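-- pv_equiv track=rewrite | github.com/spektre-labs/creation-os | benchmarks/sigma_ablation/run_sigma_ablation.py | first_sentence
-- ===== SOURCE A (Python) =====
-- def first_sentence(text: str, cap: int = 512) -> str:
--     t = (text or "").strip().replace("\r", " ")
--     if not t:
--         return ""
--     cut = len(t)
--     for sep in (".", "!", "?", "\n"):
--         i = t.find(sep)
--         if i >= 0 and i < cut:
--             cut = i + 1
--     t = t[: min(cut, cap)].strip()
--     return t
-- ===== SOURCE B (Python) =====
-- def first_sentence(text: str, cap: int = 512) -> str:
--     t = (text or "").strip().replace("\r", " ")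
--     if not t:
--         return ""
--     cut = len(t)
--     for idx, ch in enumerate(t):
--         if ch in ".!?\n":
--             cut = idx + 1
--             break
--     return t[: min(cut, cap)].strip()
-- ===== Notes on version B (the rewrite author's own statement) =====
-- stated objective: alternative
-- what changed: Replaces A's four sequential str.find scans with min-tracking by a single left-to-right pass over enumerate(t) that stops at the first terminator character.
import Mathlib
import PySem

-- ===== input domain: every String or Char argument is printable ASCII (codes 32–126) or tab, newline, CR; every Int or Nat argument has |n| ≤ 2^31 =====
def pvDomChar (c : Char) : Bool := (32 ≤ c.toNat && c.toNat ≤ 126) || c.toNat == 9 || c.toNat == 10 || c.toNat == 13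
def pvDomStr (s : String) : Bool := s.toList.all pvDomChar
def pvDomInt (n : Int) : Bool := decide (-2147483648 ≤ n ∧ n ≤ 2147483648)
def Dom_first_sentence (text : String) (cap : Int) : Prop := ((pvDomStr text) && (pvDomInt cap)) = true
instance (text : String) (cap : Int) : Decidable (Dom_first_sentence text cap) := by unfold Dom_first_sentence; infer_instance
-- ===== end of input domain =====

-- B replaces A's four sequential find() scans (with min-tracking) by one left-to-right
-- pass over enumerate(t) that stops at the first terminator (objective: alternative).

-- ===== PORT A =====
def first_sentence (text : String) (cap : Int) : String :=
  let t := PySem.Chars.replace (PySem.Chars.strip text.toList) ['\r'] [' ']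
  if t = [] then ""
  else
    let cut : Int := (t.length : Int)
    let cut := [['.'], ['!'], ['?'], ['\n']].foldl
      (fun cut sep =>
        let i := PySem.Chars.find t sep
        if 0 ≤ i ∧ i < cut then i + 1 else cut) cut
    String.ofList (PySem.Chars.strip (PySem.Chars.slice t none (some (min cut cap))))

-- ===== PORT B =====
-- the single scan over enumerate(t): first terminator gives idx + 1, else the default
def fsScan : List (Int × Char) → Int → Int
  | [], cut => cut
  | (idx, ch) :: rest, cut =>
      if ['.', '!', '?', '\n'].contains ch then idx + 1 else fsScan rest cut

def first_sentence_alt (text : String) (cap : Int) : String :=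
  let t := PySem.Chars.replace (PySem.Chars.strip text.toList) ['\r'] [' ']
  if t = [] then ""
  else
    let cut : Int := fsScan (PySem.List.enumerate t 0) (t.length : Int)
    String.ofList (PySem.Chars.strip (PySem.Chars.slice t none (some (min cut cap))))

-- ===== PRECONDITION & SPEC =====
def Spec_first_sentence (text : String) (cap : Int) (out : String) : Prop := out = first_sentence_alt text cap
instance (text : String) (cap : Int) (out : String) : Decidable (Spec_first_sentence text cap out) := by unfold Spec_first_sentence; infer_instance

-- ===== CLAIM (what is proved, stated in full; the proofs are below) =====
def Claim_equal_first_sentence : Prop := ∀ (text : String) (cap : Int), Dom_first_sentence text cap → Spec_first_sentence text cap (first_sentence text cap)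

-- ===== LEMMAS AND PROOFS =====

-- [c] is a prefix of l iff l starts with c
theorem fs_singleton_prefix (c : Char) (l : List Char) : [c] <+: l ↔ l.head? = some c := by
  constructor
  · rintro ⟨r, rfl⟩; rfl
  · cases l with
    | nil => intro h; cases h
    | cons a l =>
      intro h
      have ha : a = c := by simpa using h
      subst ha
      exact ⟨l, rfl⟩

-- find for a single-character needle: -1 iff the character is absent
theorem fs_find_singleton_neg (t : List Char) (c : Char) :
    PySem.Chars.find t [c] = -1 ↔ c ∉ t := by
  rw [PySem.Chars.find_eq_neg_one_iff]
  constructor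
  · intro h hm
    obtain ⟨s₁, s₂, rfl⟩ := List.append_of_mem hm
    exact h ⟨s₁, s₂, by simp⟩
  · intro h hinf
    exact h (List.singleton_sublist.mp hinf.sublist)

-- find for a single-character needle present in t: it is the first index of c
theorem fs_find_singleton_spec (t : List Char) (c : Char) (h : c ∈ t) :
    0 ≤ PySem.Chars.find t [c] ∧
    t[(PySem.Chars.find t [c]).toNat]? = some c ∧
    ∀ i < (PySem.Chars.find t [c]).toNat, t[i]? ≠ some c := by
  have h0 : 0 ≤ PySem.Chars.find t [c] := by
    rw [PySem.Chars.find_nonneg_iff]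
    obtain ⟨s₁, s₂, rfl⟩ := List.append_of_mem h
    exact ⟨s₁, s₂, by simp⟩
  obtain ⟨hp, hmin⟩ := PySem.Chars.find_spec h0
  refine ⟨h0, ?_, ?_⟩
  · rw [← List.head?_drop]; exact (fs_singleton_prefix c _).mp hp
  · intro i hi hgi
    exact hmin i hi ((fs_singleton_prefix c _).mpr (by rw [List.head?_drop]; exact hgi))

-- B's scan over enumerate equals the findIdx? characterisation
theorem fs_scan_eq (t : List Char) (s d : Int) :
    fsScan (PySem.List.enumerate t s) d =
      match List.findIdx? (fun c => decide (c = '.') || (decide (c = '!') || (decide (c = '?') || decide (c = '\n')))) t with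
      | some k => s + k + 1
      | none => d := by
  induction t generalizing s with
  | nil => simp [PySem.List.enumerate_nil, fsScan]
  | cons a t ih =>
    rw [PySem.List.enumerate_cons, List.findIdx?_cons]
    by_cases h' : a = '.' ∨ a = '!' ∨ a = '?' ∨ a = '\n'
    · simp [fsScan, h']
    · simp only [fsScan]
      rw [if_neg (by simpa using h'), if_neg (by simpa using h'), ih]
      cases hf : List.findIdx? (fun c => decide (c = '.') || (decide (c = '!') || (decide (c = '?') || decide (c = '\n')))) t with
      | none => simp
      | some k => simp; omega

-- one min-update step of A's loop, abstracted
def fsStep (f cut : Int) : Int := if 0 ≤ f ∧ f < cut then f + 1 else cut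

-- the arithmetic core of A's fold: four candidate first-occurrence indices,
-- each absent (-1) or in [k, len), one of them equal to k, give cut = k + 1
theorem fs_fold_core (fD fB fQ fN len k : Int)
    (hd : fD = -1 ∨ (0 ≤ fD ∧ k ≤ fD ∧ fD < len))
    (hb : fB = -1 ∨ (0 ≤ fB ∧ k ≤ fB ∧ fB < len))
    (hq : fQ = -1 ∨ (0 ≤ fQ ∧ k ≤ fQ ∧ fQ < len))
    (hn : fN = -1 ∨ (0 ≤ fN ∧ k ≤ fN ∧ fN < len))
    (hone : fD = k ∨ fB = k ∨ fQ = k ∨ fN = k)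
    (hk : 0 ≤ k) (hklen : k < len) :
    fsStep fN (fsStep fQ (fsStep fB (fsStep fD len))) = k + 1 := by
  unfold fsStep
  split_ifs <;> omega

-- A's four-find fold equals the same characterisation
theorem fs_fold_eq (t : List Char) :
    ([['.'], ['!'], ['?'], ['\n']].foldl
      (fun cut sep =>
        let i := PySem.Chars.find t sep
        if 0 ≤ i ∧ i < cut then i + 1 else cut) ((t.length : Int))) =
      match List.findIdx? (fun c => decide (c = '.') || (decide (c = '!') || (decide (c = '?') || decide (c = '\n')))) t with
      | some k => (k : Int) + 1
      | none => (t.length : Int) := by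
  cases hJ : List.findIdx? (fun c => decide (c = '.') || (decide (c = '!') || (decide (c = '?') || decide (c = '\n')))) t with
  | none =>
    rw [List.findIdx?_eq_none_iff] at hJ
    have hd : PySem.Chars.find t ['.'] = -1 := (fs_find_singleton_neg t '.').mpr (fun hm => by simpa using hJ _ hm)
    have hb : PySem.Chars.find t ['!'] = -1 := (fs_find_singleton_neg t '!').mpr (fun hm => by simpa using hJ _ hm)
    have hq : PySem.Chars.find t ['?'] = -1 := (fs_find_singleton_neg t '?').mpr (fun hm => by simpa using hJ _ hm)
    have hn : PySem.Chars.find t ['\n'] = -1 := (fs_find_singleton_neg t '\n').mpr (fun hm => by simpa using hJ _ hm)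
    simp [List.foldl, hd, hb, hq, hn]
  | some k =>
    rw [List.findIdx?_eq_some_iff_getElem] at hJ
    obtain ⟨hklt, hpk, hmin⟩ := hJ
    -- every terminator character either is absent or first occurs at index ≥ k (and < length)
    have key : ∀ c : Char, (c = '.' ∨ c = '!' ∨ c = '?' ∨ c = '\n') →
        PySem.Chars.find t [c] = -1 ∨
        (0 ≤ PySem.Chars.find t [c] ∧ (k : Int) ≤ PySem.Chars.find t [c] ∧
          PySem.Chars.find t [c] < (t.length : Int)) := by
      intro c hc
      by_cases hm : c ∈ t
      · right
        obtain ⟨h0, hget, _⟩ := fs_find_singleton_spec t c hm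
        set n := (PySem.Chars.find t [c]).toNat with hn
        have hnlt : n < t.length := by
          by_contra hge
          simp [List.getElem?_eq_none (by omega : t.length ≤ n)] at hget
        have hgc : t[n] = c := by
          have := List.getElem?_eq_getElem hnlt
          rw [this] at hget
          exact Option.some.inj hget
        have hkn : k ≤ n := by
          by_contra hlt
          have := hmin n (by omega)
          rw [hgc] at this
          rcases hc with rfl | rfl | rfl | rfl <;> simp at this
        refine ⟨h0, ?_, ?_⟩ <;> omega
      · exact Or.inl ((fs_find_singleton_neg t c).mpr hm)
    -- the character at k is a terminator and its find equals k
    have hterm : t[k] = '.' ∨ t[k] = '!' ∨ t[k] = '?' ∨ t[k] = '\n' := by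
      simpa using hpk
    have hkeq : PySem.Chars.find t [t[k]] = (k : Int) := by
      obtain ⟨h0, hget, hmn⟩ := fs_find_singleton_spec t t[k] (List.getElem_mem hklt)
      set n := (PySem.Chars.find t [t[k]]).toNat with hn
      have hne : n = k := by
        by_contra hne
        rcases Nat.lt_or_ge n k with hlt | hge
        · have := hmin n hlt
          have hg : t[n] = t[k] := by
            have hnlt : n < t.length := by omega
            have := List.getElem?_eq_getElem hnlt
            rw [this] at hget
            exact Option.some.inj hget
          rw [hg] at this
          rcases hterm with h | h | h | h <;> rw [h] at this <;> simp at this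
        · exact hmn k (by omega) (by rw [List.getElem?_eq_getElem hklt])
      omega
    have hd := key '.' (by tauto)
    have hb := key '!' (by tauto)
    have hq := key '?' (by tauto)
    have hn := key '\n' (by tauto)
    have hone : PySem.Chars.find t ['.'] = (k : Int) ∨ PySem.Chars.find t ['!'] = (k : Int) ∨
        PySem.Chars.find t ['?'] = (k : Int) ∨ PySem.Chars.find t ['\n'] = (k : Int) := by
      rcases hterm with h | h | h | h <;> rw [h] at hkeq <;> tauto
    exact fs_fold_core _ _ _ _ _ _ hd hb hq hn hone (Int.natCast_nonneg k) (by exact_mod_cast hklt)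

-- ===== VERDICT (by name: the statement is the Claim_ definition above) =====
theorem first_sentence_spec : Claim_equal_first_sentence := by
  intro text cap _
  unfold Spec_first_sentence first_sentence first_sentence_alt
  simp only [fs_scan_eq, fs_fold_eq, zero_add]
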